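-- pv_equiv track=rewrite | github.com/kcerauno/SLOT_AND_HMM | hypothesis/02_compound_hmm/source/single_vs_compound_analysis.py | find_v8_splits_first
-- ===== SOURCE A (Python) =====
-- SLOTS_V8 = [
--     ["l", "r", "o", "y", "s", "v"],
--     ["q", "s", "d", "x", "l", "r", "h", "z"],
--     ["o", "y"], ["d", "r"], ["t", "k", "p", "f"],
--     ["ch", "sh"], ["cth", "ckh", "cph", "cfh"],
--     ["eee", "ee", "e", "g"],
--     ["k", "t", "p", "f", "ch", "sh", "l", "r", "o", "y"],
--     ["s", "d", "c"], ["o", "a", "y"], ["iii", "ii", "i"],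
--     ["d", "l", "r", "m", "n"], ["s"], ["y"],
--     ["k", "t", "p", "f", "l", "r", "o", "y"],
-- ]
--
-- def parse_greedy(word: str) -> tuple:
--     pos, matched = 0, []
--     for idx, options in enumerate(SLOTS_V8):
--         if pos >= len(word):
--             break
--         for opt in options:
--             if word.startswith(opt, pos):
--                 matched.append((idx, opt))
--                 pos += len(opt)
--                 break
--     return matched, word[pos:]
--
-- def is_base(word: str) -> bool:
--     m, r = parse_greedy(word)
--     return r == "" and bool(m)
--
-- def find_v8_splits_first(word: str):
--     for i in range(1, len(word)):
--         p1 = word[:i]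
--         if not is_base(p1):
--             continue
--         rest = word[i:]
--         if is_base(rest):
--             return (p1, rest)
--         for j in range(1, len(rest)):
--             p2 = rest[:j]
--             if not is_base(p2):
--                 continue
--             rest2 = rest[j:]
--             if is_base(rest2):
--                 return (p1, p2, rest2)
--             for kk in range(1, len(rest2)):
--                 if is_base(rest2[:kk]) and is_base(rest2[kk:]):
--                     return (p1, p2, rest2[:kk], rest2[kk:])
--     return None
-- ===== SOURCE B (Python) =====
-- SLOTS_V8 = [
--     ["l", "r", "o", "y", "s", "v"],
--     ["q", "s", "d", "x", "l", "r", "h", "z"],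
--     ["o", "y"], ["d", "r"], ["t", "k", "p", "f"],
--     ["ch", "sh"], ["cth", "ckh", "cph", "cfh"],
--     ["eee", "ee", "e", "g"],
--     ["k", "t", "p", "f", "ch", "sh", "l", "r", "o", "y"],
--     ["s", "d", "c"], ["o", "a", "y"], ["iii", "ii", "i"],
--     ["d", "l", "r", "m", "n"], ["s"], ["y"],
--     ["k", "t", "p", "f", "l", "r", "o", "y"],
-- ]
--
-- def parse_greedy(word: str) -> tuple:
--     pos, matched = 0, []
--     for idx, options in enumerate(SLOTS_V8):
--         if pos >= len(word):
--             break
--         for opt in options: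
--             if word.startswith(opt, pos):
--                 matched.append((idx, opt))
--                 pos += len(opt)
--                 break
--     return matched, word[pos:]
--
-- def is_base(word: str) -> bool:
--     m, r = parse_greedy(word)
--     return r == "" and bool(m)
--
-- def find_v8_splits_first(word: str):
--     n = len(word)
--     # base[i][j]: word[i:j] is a base chunk, computed once for every substring
--     base = [[is_base(word[i:j]) for j in range(n + 1)] for i in range(n + 1)]
--
--     def extend(dp):
--         # out[i]: first split of word[i:] into at most (level of dp)+1 base
--         # chunks, preferring the whole suffix, then the smallest first cut.
--         out = []
--         for i in range(n + 1):
--             if base[i][n]: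
--                 out.append([word[i:]])
--             else:
--                 found = None
--                 for j in range(i + 1, n):
--                     if base[i][j] and dp[j] is not None:
--                         found = [word[i:j]] + dp[j]
--                         break
--                 out.append(found)
--         return out
--
--     dp = [[word[i:]] if base[i][n] else None for i in range(n + 1)]
--     dp = extend(extend(dp))  # first split of each suffix into at most 3 chunks
--     for i in range(1, n):
--         if base[0][i] and dp[i] is not None:
--             return tuple([word[:i]] + dp[i])
--     return None
-- ===== Notes on version B (the rewrite author's own statement) =====
-- stated objective: alternative
-- what changed: A's three hand-copied nested split loops are replaced by a precomputed is_base table over all substrings plus a bottom-up DP (dp[i] = first split of word[i:] into at most k chunks, lifted twice), the answer read off by one scan over the first cut; no nested re-parsing of substrings.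
import Mathlib
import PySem

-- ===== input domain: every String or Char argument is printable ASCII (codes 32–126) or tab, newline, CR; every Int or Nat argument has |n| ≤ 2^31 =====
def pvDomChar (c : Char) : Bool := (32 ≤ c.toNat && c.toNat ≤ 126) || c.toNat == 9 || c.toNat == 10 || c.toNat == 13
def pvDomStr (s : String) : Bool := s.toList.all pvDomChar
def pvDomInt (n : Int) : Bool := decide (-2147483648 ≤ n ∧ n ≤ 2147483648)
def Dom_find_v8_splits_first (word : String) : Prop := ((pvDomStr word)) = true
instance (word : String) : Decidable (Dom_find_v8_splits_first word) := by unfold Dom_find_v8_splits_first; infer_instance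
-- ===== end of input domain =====

-- B replaces A's three nested split loops by a precomputed is_base table over all
-- substrings plus a bottom-up DP over suffixes (objective: alternative algorithm).

-- ===== shared helpers (identical module-level code in Source A and Source B) =====
def SLOTS_V8 : List (List String) := [
  ["l", "r", "o", "y", "s", "v"],
  ["q", "s", "d", "x", "l", "r", "h", "z"],
  ["o", "y"], ["d", "r"], ["t", "k", "p", "f"],
  ["ch", "sh"], ["cth", "ckh", "cph", "cfh"],
  ["eee", "ee", "e", "g"],
  ["k", "t", "p", "f", "ch", "sh", "l", "r", "o", "y"],
  ["s", "d", "c"], ["o", "a", "y"], ["iii", "ii", "i"],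
  ["d", "l", "r", "m", "n"], ["s"], ["y"],
  ["k", "t", "p", "f", "l", "r", "o", "y"]]

-- the for-loop of parse_greedy over enumerate(SLOTS_V8); the inner for-with-break is find?.
-- word.startswith(opt, pos) is ported as startswith(word[pos:], opt): exact here since 0 ≤ pos ≤ len(word) throughout.
def pgLoop (word : String) : List (List String) → Int → Int → List (Int × String) → Int × List (Int × String)
  | [], _, pos, matched => (pos, matched)
  | options :: rest, idx, pos, matched =>
      if PySem.Str.len word ≤ pos then (pos, matched)
      else
        match options.find? (fun opt => PySem.Str.startswith (PySem.Str.slice word (some pos) none) opt) with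
        | some opt => pgLoop word rest (idx + 1) (pos + PySem.Str.len opt) (matched ++ [(idx, opt)])
        | none => pgLoop word rest (idx + 1) pos matched

def parse_greedy (word : String) : List (Int × String) × String :=
  let r := pgLoop word SLOTS_V8 0 0 []
  (r.2, PySem.Str.slice word (some r.1) none)

def is_base (word : String) : Bool :=
  let mr := parse_greedy word
  (mr.2 == "") && !mr.1.isEmpty

-- ===== PORT A =====
-- each 'for … return/continue … ; return None' is List.findSome? over the same range
def find_v8_splits_first (word : String) : Option (List String) :=
  (PySem.List.pyRange 1 (PySem.Str.len word) 1).findSome? fun i =>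
    let p1 := PySem.Str.slice word none (some i)
    if !(is_base p1) then none
    else
      let rest := PySem.Str.slice word (some i) none
      if is_base rest then some [p1, rest]
      else
        (PySem.List.pyRange 1 (PySem.Str.len rest) 1).findSome? fun j =>
          let p2 := PySem.Str.slice rest none (some j)
          if !(is_base p2) then none
          else
            let rest2 := PySem.Str.slice rest (some j) none
            if is_base rest2 then some [p1, p2, rest2]
            else
              (PySem.List.pyRange 1 (PySem.Str.len rest2) 1).findSome? fun kk =>
                if is_base (PySem.Str.slice rest2 none (some kk)) && is_base (PySem.Str.slice rest2 (some kk) none)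
                then some [p1, p2, PySem.Str.slice rest2 none (some kk), PySem.Str.slice rest2 (some kk) none]
                else none

-- ===== PORT B =====
-- base[i][j] lookup; in Source B the indices are always in range, so getD's defaults are never read
def tabGet (base : List (List Bool)) (i j : Nat) : Bool := (base.getD i []).getD j false

-- base = [[is_base(word[i:j]) for j in range(n+1)] for i in range(n+1)]
def baseTab (word : String) (n : Nat) : List (List Bool) :=
  (List.range (n + 1)).map fun (i : Nat) =>
    (List.range (n + 1)).map fun (j : Nat) =>
      is_base (PySem.Str.slice word (some (i : Int)) (some (j : Int)))

-- extend(dp): out[i] = [word[i:]] if base[i][n] else the first j in range(i+1, n)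
-- with base[i][j] and dp[j] not None (the for-with-break is findSome?)
def extendDP (word : String) (n : Nat) (base : List (List Bool))
    (dp : List (Option (List String))) : List (Option (List String)) :=
  (List.range (n + 1)).map fun (i : Nat) =>
    if tabGet base i n then some [PySem.Str.slice word (some (i : Int)) none]
    else
      (List.range' (i + 1) (n - (i + 1))).findSome? fun (j : Nat) =>
        if tabGet base i j then
          (dp.getD j none).map (fun sub => PySem.Str.slice word (some (i : Int)) (some (j : Int)) :: sub)
        else none

-- n = len(word) (a Nat: len is never negative); dp built bottom-up, then one scan over the first cut
def find_v8_splits_first_alt (word : String) : Option (List String) :=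
  let n := word.toList.length
  let base := baseTab word n
  let dp0 := (List.range (n + 1)).map fun (i : Nat) =>
    if tabGet base i n then some [PySem.Str.slice word (some (i : Int)) none] else none
  let dp := extendDP word n base (extendDP word n base dp0)
  (List.range' 1 (n - 1)).findSome? fun (i : Nat) =>
    if tabGet base 0 i then
      (dp.getD i none).map (fun sub => PySem.Str.slice word none (some (i : Int)) :: sub)
    else none

-- ===== PRECONDITION & SPEC =====
def Spec_find_v8_splits_first (word : String) (out : Option (List String)) : Prop := out = find_v8_splits_first_alt word
instance (word : String) (out : Option (List String)) : Decidable (Spec_find_v8_splits_first word out) := by unfold Spec_find_v8_splits_first; infer_instance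

-- ===== CLAIM (what is proved, stated in full; the proofs are below) =====
def Claim_equal_find_v8_splits_first : Prop := ∀ (word : String), Dom_find_v8_splits_first word → Spec_find_v8_splits_first word (find_v8_splits_first word)

-- ===== LEMMAS AND PROOFS =====

-- proof-side reference function: first split of s into at most k base chunks,
-- preferring the whole string, then the smallest first cut (A's search order)
def splitRec : Nat → String → Option (List String)
  | 0, _ => none
  | k + 1, s =>
      if is_base s then some [s]
      else if 1 ≤ k then
        (PySem.List.pyRange 1 (PySem.Str.len s) 1).findSome? fun j =>
          let p := PySem.Str.slice s none (some j)
          if is_base p then (splitRec k (PySem.Str.slice s (some j) none)).map (fun sub => p :: sub)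
          else none
      else none

theorem findSome?_ext {α β : Type} {f g : α → Option β} (l : List α) (h : ∀ x, f x = g x) :
    l.findSome? f = l.findSome? g := by
  rw [show f = g from funext h]

theorem findSome?_congr {α β : Type} {f g : α → Option β} :
    ∀ (l : List α), (∀ x ∈ l, f x = g x) → l.findSome? f = l.findSome? g := by
  intro l
  induction l with
  | nil => intro _; rfl
  | cons a t ih =>
      intro h
      simp only [List.findSome?_cons, h a (by simp)]
      cases g a with
      | some _ => rfl
      | none => exact ih fun x hx => h x (by simp [hx])

theorem split2_map (acc : List String) (s : String) :
    (splitRec 2 s).map (acc ++ ·) =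
      if is_base s then some (acc ++ [s])
      else
        (PySem.List.pyRange 1 (PySem.Str.len s) 1).findSome? fun kk =>
          if is_base (PySem.Str.slice s none (some kk)) && is_base (PySem.Str.slice s (some kk) none)
          then some (acc ++ [PySem.Str.slice s none (some kk), PySem.Str.slice s (some kk) none])
          else none := by
  rw [splitRec]
  cases is_base s
  · simp only [Bool.false_eq_true, if_false, le_refl, if_true, List.map_findSome?]
    refine findSome?_ext _ fun kk => ?_
    simp only [Function.comp]
    cases is_base (PySem.Str.slice s none (some kk))
    · simp
    · simp only [if_true, Bool.true_and, Option.map_map]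
      rw [splitRec]
      cases is_base (PySem.Str.slice s (some kk) none) <;> simp
  · simp

theorem split3_map (acc : List String) (s : String) :
    (splitRec 3 s).map (acc ++ ·) =
      if is_base s then some (acc ++ [s])
      else
        (PySem.List.pyRange 1 (PySem.Str.len s) 1).findSome? fun j =>
          let p2 := PySem.Str.slice s none (some j)
          if !(is_base p2) then none
          else
            let rest2 := PySem.Str.slice s (some j) none
            if is_base rest2 then some (acc ++ [p2, rest2])
            else
              (PySem.List.pyRange 1 (PySem.Str.len rest2) 1).findSome? fun kk =>
                if is_base (PySem.Str.slice rest2 none (some kk)) && is_base (PySem.Str.slice rest2 (some kk) none)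
                then some (acc ++ [p2, PySem.Str.slice rest2 none (some kk), PySem.Str.slice rest2 (some kk) none])
                else none := by
  rw [splitRec]
  cases is_base s
  · simp only [Bool.false_eq_true, if_false, Nat.one_le_iff_ne_zero, ne_eq,
      OfNat.ofNat_ne_zero, not_false_eq_true, if_true, List.map_findSome?]
    refine findSome?_ext _ fun j => ?_
    simp only [Function.comp]
    cases is_base (PySem.Str.slice s none (some j))
    · simp
    · simp only [if_true, Bool.not_true, Bool.false_eq_true, if_false, Option.map_map]
      have hcomp : ((acc ++ ·) ∘ (fun sub => PySem.Str.slice s none (some j) :: sub))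
          = ((acc ++ [PySem.Str.slice s none (some j)]) ++ ·) := by
        funext x; simp
      rw [show ((fun x => acc ++ x) ∘ (fun sub => PySem.Str.slice s none (some j) :: sub))
          = ((acc ++ [PySem.Str.slice s none (some j)]) ++ ·) from hcomp, split2_map]
      cases is_base (PySem.Str.slice s (some j) none) <;> simp
  · simp

-- A equals the driver over splitRec
theorem A_eq_splitRec (word : String) :
    find_v8_splits_first word =
      (PySem.List.pyRange 1 (PySem.Str.len word) 1).findSome? fun i =>
        let p1 := PySem.Str.slice word none (some i)
        if is_base p1 then (splitRec 3 (PySem.Str.slice word (some i) none)).map (fun sub => p1 :: sub)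
        else none := by
  unfold find_v8_splits_first
  refine findSome?_ext _ fun i => ?_
  cases hb : is_base (PySem.Str.slice word none (some i))
  · simp [hb]
  · simp only [hb, Bool.not_true, Bool.false_eq_true, if_false, if_true]
    have hcomp : (fun sub => PySem.Str.slice word none (some i) :: sub)
        = (([PySem.Str.slice word none (some i)]) ++ ·) := by
      funext x; simp
    rw [hcomp, split3_map]
    simp


theorem sub_full (word : String) (i : Nat) :
    PySem.Str.slice word (some (i : Int)) (some (word.toList.length : Int)) =
      PySem.Str.slice word (some (i : Int)) none := by
  apply String.toList_inj.mp
  simp [PySem.List.slice_natCast, PySem.List.slice_from_natCast]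

theorem slice_sfx_to (word : String) (i j : Nat) :
    PySem.Str.slice (PySem.Str.slice word (some (i : Int)) none) none (some (j : Int)) =
      PySem.Str.slice word (some (i : Int)) (some ((i + j : Nat) : Int)) := by
  apply String.toList_inj.mp
  simp only [PySem.Str.toList_slice, PySem.Chars.slice_eq_listSlice, Nat.cast_add,
    PySem.List.slice_natCast_add, PySem.List.slice_from_natCast, PySem.List.slice_to_natCast]

theorem slice_sfx_from (word : String) (i j : Nat) :
    PySem.Str.slice (PySem.Str.slice word (some (i : Int)) none) (some (j : Int)) none =
      PySem.Str.slice word (some ((i + j : Nat) : Int)) none := by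
  apply String.toList_inj.mp
  simp only [PySem.Str.toList_slice, PySem.Chars.slice_eq_listSlice,
    PySem.List.slice_from_natCast, List.drop_drop]

theorem len_sfx (word : String) (i : Nat) :
    PySem.Str.len (PySem.Str.slice word (some (i : Int)) none) = ((word.toList.length - i : Nat) : Int) := by
  simp [PySem.List.slice_from_natCast]

theorem tabGet_base (word : String) (n i j : Nat) (hi : i < n + 1) (hj : j < n + 1) :
    tabGet (baseTab word n) i j = is_base (PySem.Str.slice word (some (i : Int)) (some (j : Int))) := by
  unfold tabGet baseTab
  rw [PySem.List.getD_map_range _ _ _ _ hi, PySem.List.getD_map_range _ _ _ _ hj]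

-- one extend step: if dp agrees with splitRec m on every suffix, extendDP agrees with splitRec (m+1)
theorem extend_correct (word : String) (m : Nat) (hm : 1 <= m)
    (dp : List (Option (List String)))
    (hdp : ∀ j : Nat, j <= word.toList.length → dp.getD j none = splitRec m (PySem.Str.slice word (some (j : Int)) none)) :
    ∀ i : Nat, i <= word.toList.length →
      (extendDP word word.toList.length (baseTab word word.toList.length) dp).getD i none =
        splitRec (m + 1) (PySem.Str.slice word (some (i : Int)) none) := by
  intro i hi
  set n := word.toList.length with hn
  unfold extendDP
  rw [PySem.List.getD_map_range _ _ _ _ (by omega)]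
  rw [tabGet_base word n i n (by omega) (by omega), sub_full]
  rw [splitRec]
  cases is_base (PySem.Str.slice word (some (i : Int)) none)
  · simp only [Bool.false_eq_true, if_false, if_pos hm]
    rw [len_sfx, PySem.List.pyRange_one, List.range'_eq_map_range,
      List.findSome?_map, List.findSome?_map]
    have hlen : (((n - i : Nat) : Int) - 1).toNat = n - (i + 1) := by omega
    rw [hlen]
    refine findSome?_congr _ fun k hk => ?_
    have hk' : k < n - (i + 1) := List.mem_range.mp hk
    simp only [Function.comp]
    have e2 : i + 1 + k = i + (1 + k) := by omega
    rw [e2]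
    have e1 : (1 : Int) + (k : Int) = ((1 + k : Nat) : Int) := by push_cast; ring
    rw [e1, slice_sfx_to, slice_sfx_from]
    rw [tabGet_base word n i (i + (1 + k)) (by omega) (by omega)]
    rw [hdp (i + (1 + k)) (by omega)]
  · simp

theorem B_eq_splitRec (word : String) :
    find_v8_splits_first_alt word =
      (PySem.List.pyRange 1 (PySem.Str.len word) 1).findSome? fun i =>
        let p1 := PySem.Str.slice word none (some i)
        if is_base p1 then (splitRec 3 (PySem.Str.slice word (some i) none)).map (fun sub => p1 :: sub)
        else none := by
  show (let n := word.toList.length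
        let base := baseTab word n
        let dp0 := (List.range (n + 1)).map fun (i : Nat) =>
          if tabGet base i n then some [PySem.Str.slice word (some (i : Int)) none] else none
        let dp := extendDP word n base (extendDP word n base dp0)
        (List.range' 1 (n - 1)).findSome? fun (i : Nat) =>
          if tabGet base 0 i then
            (dp.getD i none).map (fun sub => PySem.Str.slice word none (some (i : Int)) :: sub)
          else none) = _
  simp only []
  set n := word.toList.length with hn
  have hdp0 : ∀ j : Nat, j <= n →
      (((List.range (n + 1)).map fun (i : Nat) =>
        if tabGet (baseTab word n) i n then some [PySem.Str.slice word (some (i : Int)) none] else none).getD j none)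
        = splitRec 1 (PySem.Str.slice word (some (j : Int)) none) := by
    intro j hj
    rw [PySem.List.getD_map_range _ _ _ _ (by omega)]
    rw [tabGet_base word n j n (by omega) (by omega), sub_full]
    rw [splitRec]
    cases is_base (PySem.Str.slice word (some (j : Int)) none) <;> simp
  have hdp2 := extend_correct word 1 (le_refl 1) _ hdp0
  have hdp3 := extend_correct word 2 (by omega) _ hdp2
  have hlenw : PySem.Str.len word = (n : Int) := by simp [hn]
  rw [hlenw, PySem.List.pyRange_one, List.range'_eq_map_range, List.findSome?_map, List.findSome?_map]
  have hlen : ((n : Int) - 1).toNat = n - 1 := by omega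
  rw [hlen]
  refine findSome?_congr _ fun k hk => ?_
  have hk' : k < n - 1 := List.mem_range.mp hk
  simp only [Function.comp]
  have e1 : (1 : Int) + (k : Int) = ((1 + k : Nat) : Int) := by push_cast; ring
  rw [e1, tabGet_base word n 0 (1 + k) (by omega) (by omega)]
  have e0 : PySem.Str.slice word (some ((0 : Nat) : Int)) (some ((1 + k : Nat) : Int))
      = PySem.Str.slice word none (some ((1 + k : Nat) : Int)) := by
    apply String.toList_inj.mp
    simp
  rw [e0, hdp3 (1 + k) (by omega)]

-- ===== VERDICT (by name: the statement is the Claim_ definition above) =====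
theorem find_v8_splits_first_spec : Claim_equal_find_v8_splits_first := by
  intro word _
  unfold Spec_find_v8_splits_first
  rw [A_eq_splitRec, B_eq_splitRec]
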